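-- pv_equiv track=rewrite | github.com/JungTag/Algorithm_Study | Study2021/Implementation/1790(수 이어 쓰기2).py | calc
-- ===== SOURCE A (Python) =====
-- def calc(t): # t까지의 수를 모두 이어 썼을 때 그 수의 길이
--     ans = 0 # 수의 길이
--     start = 1 # 자리수의 첫 수(1, 10, 100, ...)
--     len = 1 # 숫자 하나당 길이
--     while (start <= t):
--         end = start*10 - 1 # 자리수의 마지막 수(9, 99, 999, ...)
--         if (end >= t):
--             ans += (t-start+1) * len
--         else:
--             ans += (end-start+1) * len # +9 , +90, +900, ...
--         start *= 10
--         len += 1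
--     return ans
-- ===== SOURCE B (Python) =====
-- def calc(t):
--     if t < 1:
--         return 0
--     d = 0
--     n = t
--     while n > 0:
--         n //= 10
--         d += 1
--     return (t + 1) * d - (10 ** d - 1) // 9
-- ===== Notes on version B (the rewrite author's own statement) =====
-- stated objective: simpler
-- what changed: Replaced A's per-digit-group accumulation loop over (start,end) ranges with a single closed-form expression (t+1)*d minus the d-digit repunit, after a plain digit count of t.
import Mathlib
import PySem

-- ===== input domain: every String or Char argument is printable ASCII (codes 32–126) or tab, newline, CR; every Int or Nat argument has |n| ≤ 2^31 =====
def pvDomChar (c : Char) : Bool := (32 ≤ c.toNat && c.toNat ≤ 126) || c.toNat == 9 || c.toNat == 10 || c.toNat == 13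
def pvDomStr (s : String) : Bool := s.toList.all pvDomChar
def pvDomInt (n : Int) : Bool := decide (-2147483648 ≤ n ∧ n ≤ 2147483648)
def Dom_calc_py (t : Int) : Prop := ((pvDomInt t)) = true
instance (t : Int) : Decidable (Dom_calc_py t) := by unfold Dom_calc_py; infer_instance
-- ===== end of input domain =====

-- B replaces A's digit-group accumulation loop with the closed form (t+1)*d - (10^d-1)//9 after a plain digit count.


-- ===== PORT A =====
-- A's while loop; the extra '1 ≤ start' conjunct is a termination guard only: the loop is
-- entered with start = 1 and start is only ever multiplied by 10, so it is always true.
def calcLoopA (t start len ans : Int) : Int :=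
  if h : start ≤ t ∧ 1 ≤ start then
    let e := start * 10 - 1
    if e ≥ t then
      calcLoopA t (start * 10) (len + 1) (ans + (t - start + 1) * len)
    else
      calcLoopA t (start * 10) (len + 1) (ans + (e - start + 1) * len)
  else ans
termination_by (t + 1 - start).toNat
decreasing_by all_goals omega

def calc_py (t : Int) : Int := calcLoopA t 1 1 0

-- ===== PORT B =====
-- Source B's digit-count loop: while n > 0: n //= 10; d += 1
def ndLoop (n d : Int) : Int :=
  if h : 0 < n then ndLoop (PySem.Int.floordiv n 10) (d + 1) else d
termination_by n.toNat
decreasing_by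
  have h1 : PySem.Int.floordiv n 10 = n / 10 := PySem.Int.floordiv_eq_ediv_of_pos (by omega)
  have h2 : 10 * (n / 10) + n % 10 = n := Int.ediv_add_emod n 10
  have h3 : 0 ≤ n % 10 := Int.emod_nonneg n (by omega)
  have h4 : n % 10 < 10 := Int.emod_lt_of_pos n (by omega)
  omega

-- '10 ** d' is ported as (10 : Int) ^ d.toNat — exact here since d ≥ 0 whenever it is computed.
def calc_py_alt (t : Int) : Int :=
  if t < 1 then 0
  else
    let d := ndLoop t 0
    (t + 1) * d - PySem.Int.floordiv (10 ^ d.toNat - 1) 9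

-- ===== PRECONDITION & SPEC =====
def Spec_calc_py (t : Int) (out : Int) : Prop := out = calc_py_alt t
instance (t : Int) (out : Int) : Decidable (Spec_calc_py t out) := by unfold Spec_calc_py; infer_instance

-- ===== CLAIM (what is proved, stated in full; the proofs are below) =====
def Claim_equal_calc_py : Prop := ∀ (t : Int), Dom_calc_py t → Spec_calc_py t (calc_py t)

-- ===== LEMMAS AND PROOFS =====

-- repunit: rep m = 1 + 10 + … + 10^(m-1)
def rep : Nat → Int
  | 0 => 0
  | m + 1 => rep m + 10 ^ m

theorem rep_nine (m : Nat) : 9 * rep m = 10 ^ m - 1 := by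
  induction m with
  | zero => simp [rep]
  | succ k ih => simp [rep, pow_succ]; ring_nf; ring_nf at ih; omega

theorem floordiv_rep (m : Nat) : PySem.Int.floordiv (10 ^ m - 1) 9 = rep m := by
  rw [← rep_nine m, PySem.Int.floordiv_eq_ediv_of_pos (by omega)]
  exact Int.mul_ediv_cancel_left _ (by omega)

theorem ndLoop_eq (n : Int) (hn : 1 ≤ n) (d : Int) :
    ndLoop n d = d + ((Nat.log 10 n.toNat + 1 : Nat) : Int) := by
  induction hgen : n.toNat using Nat.strong_induction_on generalizing n d with
  | _ m ih =>
  subst hgen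
  rw [ndLoop]
  have hpos : 0 < n := by omega
  rw [dif_pos hpos]
  have hfd : PySem.Int.floordiv n 10 = n / 10 := PySem.Int.floordiv_eq_ediv_of_pos (by omega)
  have hqr : 10 * (n / 10) + n % 10 = n := Int.ediv_add_emod n 10
  have hr0 : 0 ≤ n % 10 := Int.emod_nonneg n (by omega)
  have hr1 : n % 10 < 10 := Int.emod_lt_of_pos n (by omega)
  by_cases h10 : n < 10
  · have hz : n / 10 = 0 := by omega
    rw [hfd, hz, ndLoop]
    have hlog : Nat.log 10 n.toNat = 0 := Nat.log_eq_zero_iff.mpr (by omega)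
    rw [hlog]
    simp
  · -- 10 ≤ n
    have hq1 : 1 ≤ n / 10 := by omega
    have hqlt : (n / 10).toNat < n.toNat := by omega
    rw [hfd, ih (n / 10).toNat hqlt (n / 10) hq1 (d + 1) rfl]
    have htn : (n / 10).toNat = n.toNat / 10 := by omega
    have hlog : Nat.log 10 n.toNat = Nat.log 10 (n.toNat / 10) + 1 := by
      have h1 := Nat.log_div_base 10 n.toNat
      have h2 : 0 < Nat.log 10 n.toNat := Nat.log_pos (by omega) (by omega)
      omega
    rw [htn, hlog]
    push_cast
    ring

theorem calcLoopA_inv (t : Int) (ht : 1 ≤ t) (k : Nat) (hk : k ≤ Nat.log 10 t.toNat)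
    (ans : Int) :
    calcLoopA t (10 ^ k) ((k : Int) + 1) ans =
      ans + (t + 1) * ((Nat.log 10 t.toNat + 1 : Nat) : Int) - 10 ^ k * k
        - rep (Nat.log 10 t.toNat + 1) + rep k := by
  set L := Nat.log 10 t.toNat with hL
  have htL : (10 : Int) ^ L ≤ t := by
    have h1 : 10 ^ L ≤ t.toNat := Nat.pow_log_le_self 10 (by omega)
    have h2 : ((10 ^ L : Nat) : Int) ≤ (t.toNat : Int) := by exact_mod_cast h1
    push_cast at h2; omega
  have htU : t < (10 : Int) ^ (L + 1) := by
    have h1 : t.toNat < 10 ^ (L + 1) := Nat.lt_pow_succ_log_self (by omega) _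
    have h2 : (t.toNat : Int) < ((10 ^ (L + 1) : Nat) : Int) := by exact_mod_cast h1
    push_cast at h2; omega
  clear_value L
  suffices H : ∀ m : Nat, ∀ k : Nat, k ≤ L → L - k = m → ∀ ans : Int,
      calcLoopA t (10 ^ k) ((k : Int) + 1) ans =
        ans + (t + 1) * ((L + 1 : Nat) : Int) - 10 ^ k * k - rep (L + 1) + rep k by
    exact H (L - k) k hk rfl ans
  intro m
  induction m with
  | zero =>
    intro k hk hm ans
    have hkL : k = L := by omega
    subst hkL
    have hp : (0 : Int) < 10 ^ k := by positivity
    rw [calcLoopA, dif_pos ⟨htL, by omega⟩]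
    have hpow : (10 : Int) ^ k * 10 = 10 ^ (k + 1) := by ring
    have he : (10 : Int) ^ k * 10 - 1 ≥ t := by omega
    rw [if_pos he, calcLoopA, dif_neg (by omega)]
    have hrep : rep (k + 1) = rep k + 10 ^ k := rfl
    rw [hrep]
    push_cast
    ring
  | succ m ihm =>
    intro k hk hm ans
    have hkL : k < L := by omega
    have hp : (0 : Int) < 10 ^ k := by positivity
    have hnext : (10 : Int) ^ (k + 1) ≤ t := by
      calc (10 : Int) ^ (k + 1) ≤ 10 ^ L := by
            apply pow_le_pow_right₀ (by omega) (by omega)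
        _ ≤ t := htL
    have hpow : (10 : Int) ^ k * 10 = 10 ^ (k + 1) := by ring
    have hstart : (10 : Int) ^ k ≤ t := by
      have : (0 : Int) < 10 ^ (k + 1) := by positivity
      omega
    rw [calcLoopA, dif_pos ⟨hstart, by omega⟩]
    have he : ¬ ((10 : Int) ^ k * 10 - 1 ≥ t) := by omega
    rw [if_neg he, hpow]
    have hcall := ihm (k + 1) (by omega) (by omega)
      (ans + (10 ^ (k + 1) - 1 - 10 ^ k + 1) * ((k : Int) + 1))
    push_cast at hcall
    have harg : ans + ((10:Int) ^ k * 10 - 1 - 10 ^ k + 1) * ((k : Int) + 1)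
        = ans + ((10:Int) ^ (k + 1) - 1 - 10 ^ k + 1) * ((k : Int) + 1) := by
      rw [hpow]
    rw [show ((k : Int) + 1) + 1 = ((k : Int) + 1 + 1) from rfl]
    have hrep : rep (k + 1) = rep k + 10 ^ k := rfl
    calc calcLoopA t (10 ^ (k + 1)) ((k : Int) + 1 + 1)
          (ans + ((10:Int) ^ k * 10 - 1 - 10 ^ k + 1) * ((k : Int) + 1))
        = calcLoopA t (10 ^ (k + 1)) ((k : Int) + 1 + 1)
          (ans + ((10:Int) ^ (k + 1) - 1 - 10 ^ k + 1) * ((k : Int) + 1)) := by rw [hpow]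
      _ = ans + ((10:Int) ^ (k + 1) - 1 - 10 ^ k + 1) * ((k : Int) + 1)
            + (t + 1) * ((L : Int) + 1) - 10 ^ (k + 1) * ((k : Int) + 1)
            - rep (L + 1) + rep (k + 1) := hcall
      _ = ans + (t + 1) * ((L + 1 : Nat) : Int) - 10 ^ k * k - rep (L + 1) + rep k := by
            rw [hrep]; push_cast; ring

-- ===== VERDICT (by name: the statement is the Claim_ definition above) =====
theorem calc_py_spec : Claim_equal_calc_py := by
  intro t _
  unfold Spec_calc_py calc_py calc_py_alt
  by_cases ht : t < 1
  · rw [calcLoopA, dif_neg (by omega), if_pos ht]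
  · push Not at ht
    rw [if_neg (by omega)]
    have hnd := ndLoop_eq t ht 0
    simp only [hnd, zero_add]
    have htoNat : (((Nat.log 10 t.toNat + 1 : Nat) : Int)).toNat = Nat.log 10 t.toNat + 1 := by
      omega
    rw [htoNat, floordiv_rep]
    have h := calcLoopA_inv t ht 0 (by omega) 0
    simp only [pow_zero, Nat.cast_zero, zero_add] at h
    rw [h, rep]
    push_cast
    ring
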